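-- pv_equiv track=rewrite | github.com/Vineet-Jagga/Assignment- | Assignment/Problem 1/programming.py | count_friends
-- ===== SOURCE A (Python) =====
-- def count_friends(friends):
--     count = {}
--     for friend_group in friends:
--         if len(friend_group) == 1:
--             friend = friend_group[0]
--             count[friend] = count.get(friend, 0)
--             continue
--         for friend in friend_group:
--             count[friend] = count.get(friend, 0) + 1
--     return count
-- ===== SOURCE B (Python) =====
-- def count_friends(friends):
--     # Pass 1: tally only members of non-singleton groups.
--     counts = {}
--     for f in (m for g in friends if len(g) != 1 for m in g):
--         counts[f] = counts.get(f, 0) + 1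
--     # Pass 2: emit every friend in first-appearance order with its tally (0 if absent).
--     result = {}
--     for g in friends:
--         for f in g:
--             result[f] = counts.get(f, 0)
--     return result
-- ===== Notes on version B (the rewrite author's own statement) =====
-- stated objective: alternative
-- what changed: A interleaves counting and ordering in one loop with an inline singleton special-case; B is a two-stage table-build-then-emit: first tally members of non-singleton groups into a count table, then emit every friend in first-appearance order with its tally (0 for singleton-only friends).
import Mathlib
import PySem

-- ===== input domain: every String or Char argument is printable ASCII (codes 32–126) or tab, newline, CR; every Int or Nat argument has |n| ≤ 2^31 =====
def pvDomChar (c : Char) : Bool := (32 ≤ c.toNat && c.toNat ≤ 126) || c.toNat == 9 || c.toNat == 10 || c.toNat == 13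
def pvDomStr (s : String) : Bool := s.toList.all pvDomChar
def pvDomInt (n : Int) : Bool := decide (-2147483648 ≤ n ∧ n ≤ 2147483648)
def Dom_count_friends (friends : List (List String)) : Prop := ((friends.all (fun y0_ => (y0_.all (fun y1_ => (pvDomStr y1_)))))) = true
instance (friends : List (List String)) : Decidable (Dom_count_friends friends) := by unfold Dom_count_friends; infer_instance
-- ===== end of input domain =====

-- B replaces A's single interleaved loop (inline singleton special-case, per-element get-increment)
-- by a two-stage decomposition: tally non-singleton groups into a table, then emit friends in
-- first-appearance order with their tally; same return value (alternative, not faster).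


-- ===== PORT A =====
def count_friends (friends : List (List String)) : List (String × Int) :=
  (friends.foldl (fun (count : PySem.Dict String Int) (friend_group : List String) =>
      if friend_group.length = 1 then
        match PySem.List.pyGet? friend_group 0 with
        | some friend => count.insert friend (count.getD friend 0)
        | none => count
      else
        friend_group.foldl (fun c friend => c.insert friend (c.getD friend 0 + 1)) count)
    PySem.Dict.empty).items

-- ===== PORT B =====
def count_friends_alt (friends : List (List String)) : List (String × Int) :=
  let counts : PySem.Dict String Int :=
    ((friends.filter (fun g => g.length ≠ 1)).flatMap id).foldl
      (fun c f => c.insert f (c.getD f 0 + 1)) PySem.Dict.empty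
  (friends.foldl (fun (res : PySem.Dict String Int) (g : List String) =>
      g.foldl (fun r f => r.insert f (counts.getD f 0)) res)
    PySem.Dict.empty).items

-- ===== PRECONDITION & SPEC =====
def Spec_count_friends (friends : List (List String)) (out : List (String × Int)) : Prop := out = count_friends_alt friends
instance (friends : List (List String)) (out : List (String × Int)) : Decidable (Spec_count_friends friends out) := by unfold Spec_count_friends; infer_instance

-- ===== CLAIM (what is proved, stated in full; the proofs are below) =====
def Claim_equal_count_friends : Prop := ∀ (friends : List (List String)), Dom_count_friends friends → Spec_count_friends friends (count_friends friends)

-- ===== LEMMAS AND PROOFS =====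

-- folding over a flatMap is the nested fold
theorem pv_foldl_flatMap {α β σ : Type} (l : List α) (f : α → List β) (g : σ → β → σ) (i : σ) :
    (l.flatMap f).foldl g i = l.foldl (fun a x => (f x).foldl g a) i := by
  induction l generalizing i with
  | nil => rfl
  | cons h t ih => simp [List.flatMap_cons, List.foldl_append, ih]

-- per-group weight of A's increments: 0 for singleton groups, 1 otherwise
def pvW (g : List String) : Int := if g.length = 1 then 0 else 1

-- A's loop as one fold over weighted events
def pvEvents (friends : List (List String)) : List (String × Int) :=
  friends.flatMap (fun g => g.map (fun f => (f, pvW g)))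

def pvWStep (c : PySem.Dict String Int) (p : String × Int) : PySem.Dict String Int :=
  c.insert p.1 (c.getD p.1 0 + p.2)

theorem pv_A_eq_eventfold (friends : List (List String)) :
    count_friends friends = ((pvEvents friends).foldl pvWStep PySem.Dict.empty).items := by
  unfold count_friends pvEvents
  rw [pv_foldl_flatMap]
  have h : (fun (count : PySem.Dict String Int) (friend_group : List String) =>
      if friend_group.length = 1 then
        match PySem.List.pyGet? friend_group 0 with
        | some friend => count.insert friend (count.getD friend 0)
        | none => count
      else
        friend_group.foldl (fun c friend => c.insert friend (c.getD friend 0 + 1)) count)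
      = (fun (a : PySem.Dict String Int) (x : List String) =>
          (x.map (fun f => (f, pvW x))).foldl pvWStep a) := by
    funext c g
    match g with
    | [] => simp
    | [f] => simp [PySem.List.pyGet?, PySem.List.pyIdx?, pvWStep, pvW]
    | f :: x :: t =>
        have hlen : (f :: x :: t).length ≠ 1 := by simp
        simp only [if_neg hlen, List.foldl_map, pvWStep, pvW]
  rw [h]

theorem pv_getD_wfold (evs : List (String × Int)) (d : PySem.Dict String Int) (f : String) :
    (evs.foldl pvWStep d).getD f 0
      = d.getD f 0 + ((evs.filter (fun p => p.1 == f)).map (·.2)).sum := by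
  induction evs generalizing d with
  | nil => simp
  | cons p rest ih =>
      simp only [List.foldl_cons, ih, List.filter_cons]
      by_cases h : p.1 = f
      · simp [pvWStep, h]
        ring
      · simp [pvWStep, PySem.Dict.getD_insert, h, Ne.symm h]

theorem pv_getD_vfold (fs : List String) (d : PySem.Dict String Int) (V : String → Int) (f : String) :
    (fs.foldl (fun r x => r.insert x (V x)) d).getD f 0
      = if f ∈ fs then V f else d.getD f 0 := by
  induction fs generalizing d with
  | nil => simp
  | cons x rest ih =>
      simp only [List.foldl_cons, ih, List.mem_cons]
      by_cases hm : f ∈ rest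
      · simp [hm]
      · by_cases hx : f = x
        · simp [hx]
        · simp [hx, hm, PySem.Dict.getD_insert]

-- the weighted totals of A's events are exactly B's tallies over non-singleton groups
theorem pv_wsum_eq_count (friends : List (List String)) (f : String) :
    (((pvEvents friends).filter (fun p => p.1 == f)).map (·.2)).sum
      = (((friends.filter (fun g => g.length ≠ 1)).flatMap id).count f : Int) := by
  induction friends with
  | nil => simp [pvEvents]
  | cons g rest ih =>
      simp only [pvEvents, List.flatMap_cons, List.filter_append, List.map_append,
        List.sum_append, List.filter_cons] at *
      by_cases h : g.length = 1
      · have h0 : pvW g = 0 := by simp [pvW, h]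
        simp [h, h0, List.filter_map, Function.comp_def, ih]
      · have h1 : pvW g = 1 := by simp [pvW, h]
        simp [h, h1, List.filter_map, Function.comp_def, ih, List.count,
          List.map_const', List.sum_replicate, List.countP_eq_length_filter]

-- events' friends in order are exactly the flattened input
theorem pv_events_fst (friends : List (List String)) :
    (pvEvents friends).map Prod.fst = friends.flatten := by
  induction friends with
  | nil => rfl
  | cons g rest ih =>
      simp [pvEvents, List.flatMap_cons, List.map_append, List.map_map, Function.comp_def] at *
      exact ih

-- B's tally table
def pvCounts (friends : List (List String)) : PySem.Dict String Int :=
  ((friends.filter (fun g => g.length ≠ 1)).flatMap id).foldl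
    (fun c f => c.insert f (c.getD f 0 + 1)) PySem.Dict.empty

theorem pv_B_eq_flattenfold (friends : List (List String)) :
    count_friends_alt friends
      = (friends.flatten.foldl (fun r f => r.insert f ((pvCounts friends).getD f 0))
          PySem.Dict.empty).items := by
  show (List.foldl (fun (res : PySem.Dict String Int) (g : List String) =>
      g.foldl (fun r f => r.insert f ((pvCounts friends).getD f 0)) res)
      PySem.Dict.empty friends).items = _
  conv_rhs => rw [← List.flatMap_id]
  rw [pv_foldl_flatMap]
  rfl

theorem pv_main (friends : List (List String)) :
    count_friends friends = count_friends_alt friends := by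
  rw [pv_A_eq_eventfold, pv_B_eq_flattenfold]
  have hkA : ((pvEvents friends).foldl pvWStep PySem.Dict.empty).keys
      = PySem.Set.ofList friends.flatten := by
    calc ((pvEvents friends).foldl pvWStep PySem.Dict.empty).keys
        = PySem.Set.update (PySem.Dict.empty : PySem.Dict String Int).keys
            ((pvEvents friends).map Prod.fst) :=
          PySem.Dict.keys_foldl_insert_key (pvEvents friends) Prod.fst
            (fun d p => d.getD p.1 0 + p.2) PySem.Dict.empty
      _ = PySem.Set.ofList ((pvEvents friends).map Prod.fst) := by
          rw [PySem.Dict.keys_empty, PySem.Set.update_nil_left]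
      _ = PySem.Set.ofList friends.flatten := by rw [pv_events_fst]
  have hkB : (friends.flatten.foldl (fun r f => r.insert f ((pvCounts friends).getD f 0))
        PySem.Dict.empty).keys = PySem.Set.ofList friends.flatten := by
    calc (friends.flatten.foldl (fun r f => r.insert f ((pvCounts friends).getD f 0))
          PySem.Dict.empty).keys
        = PySem.Set.update (PySem.Dict.empty : PySem.Dict String Int).keys friends.flatten := by
          exact PySem.Dict.keys_foldl_insert friends.flatten
            (fun d x => (pvCounts friends).getD x 0) PySem.Dict.empty
      _ = PySem.Set.ofList friends.flatten := by
          rw [PySem.Dict.keys_empty, PySem.Set.update_nil_left]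
  have hnA : ((pvEvents friends).foldl pvWStep PySem.Dict.empty).keys.Nodup :=
    PySem.Dict.nodup_keys_foldl_insert_key (pvEvents friends) Prod.fst
      (fun d p => d.getD p.1 0 + p.2) PySem.Dict.empty PySem.Dict.nodup_keys_empty
  have hnB : (friends.flatten.foldl (fun r f => r.insert f ((pvCounts friends).getD f 0))
        PySem.Dict.empty).keys.Nodup :=
    PySem.Dict.nodup_keys_foldl_insert friends.flatten
      (fun d x => (pvCounts friends).getD x 0) PySem.Dict.empty PySem.Dict.nodup_keys_empty
  rw [PySem.Dict.items_eq_map_keys _ hnA 0, PySem.Dict.items_eq_map_keys _ hnB 0, hkA, hkB]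
  apply List.map_congr_left
  intro k hk
  have hmem : k ∈ friends.flatten := (PySem.Set.mem_ofList _ _).mp hk
  have hAval : ((pvEvents friends).foldl pvWStep PySem.Dict.empty).getD k 0
      = (((friends.filter (fun g => g.length ≠ 1)).flatMap id).count k : Int) := by
    rw [pv_getD_wfold, PySem.Dict.getD_empty, pv_wsum_eq_count, zero_add]
  have hCval : (pvCounts friends).getD k 0
      = (((friends.filter (fun g => g.length ≠ 1)).flatMap id).count k : Int) := by
    unfold pvCounts
    rw [PySem.Dict.getD_foldl_insert_add_one, PySem.Dict.getD_empty, zero_add]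
  have hBval : (friends.flatten.foldl (fun r f => r.insert f ((pvCounts friends).getD f 0))
        PySem.Dict.empty).getD k 0 = (pvCounts friends).getD k 0 := by
    rw [pv_getD_vfold friends.flatten PySem.Dict.empty (fun f => (pvCounts friends).getD f 0) k]
    simp [hmem]
  rw [hAval, hBval, hCval]

-- ===== VERDICT (by name: the statement is the Claim_ definition above) =====
theorem count_friends_spec : Claim_equal_count_friends := by
  intro friends _
  unfold Spec_count_friends
  exact pv_main friends
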